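-- pv_equiv track=rewrite | github.com/santuchin/tests | src/main.py | logrem
-- ===== SOURCE A (Python) =====
-- def logrem(number: int, base: int) -> tuple[int, int]:
--
-- 	factor = 1
--
-- 	count = 0
-- 	remainder = 0
--
-- 	while not number < base:
--
-- 		count += 1
--
-- 		number, temp = divmod(number, base)
--
-- 		remainder += temp * factor
-- 		factor *= base
--
--
-- 	return (count, remainder)
-- ===== SOURCE B (Python) =====
-- def logrem(number: int, base: int) -> tuple[int, int]:
--     # Different decomposition: count the divisions only, then get the
--     # whole lower-order remainder with a single modulo by base**count.
--     count = 0
--     n = number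
--     while not n < base:
--         n //= base
--         count += 1
--     return (count, number % base ** count)
-- ===== Notes on version B (the rewrite author's own statement) =====
-- stated objective: simpler
-- what changed: B drops A's two accumulators (running remainder and factor) and keeps only a division-counting loop, recovering the lower-order remainder afterwards with one closed-form modulo number % base**count.
import Mathlib
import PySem

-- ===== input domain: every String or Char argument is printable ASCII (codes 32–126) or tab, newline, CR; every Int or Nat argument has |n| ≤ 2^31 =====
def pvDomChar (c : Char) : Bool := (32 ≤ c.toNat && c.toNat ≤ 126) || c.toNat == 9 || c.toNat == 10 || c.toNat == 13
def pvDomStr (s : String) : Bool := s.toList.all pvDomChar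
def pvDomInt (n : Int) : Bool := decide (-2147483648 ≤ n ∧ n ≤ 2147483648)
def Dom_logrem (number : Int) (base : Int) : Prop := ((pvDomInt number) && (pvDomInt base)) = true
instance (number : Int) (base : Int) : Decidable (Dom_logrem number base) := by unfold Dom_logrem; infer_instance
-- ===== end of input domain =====

-- A: digit-count-above-base and accumulated lower-order remainder via divmod loop with
-- running factor; B: counts divisions only, then one closed-form modulo number % base**count.


-- ===== PORT A =====
-- A's while-loop; fuel is only a totality guard, never exhausted on Pre_ ∩ Dom_
-- (for base ≥ 2 at most 32 iterations from |number| ≤ 2^31; otherwise ≤ 1 on Pre_).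
def logremLoopA : Nat → Int → Int → Int → Int → Int → Int × Int
  | 0, _, _, _, count, remainder => (count, remainder)
  | fuel+1, number, base, factor, count, remainder =>
    if number < base then (count, remainder)
    else match PySem.Int.divmod? number base with
      | none => (count, remainder)   -- base = 0: Python raises ZeroDivisionError; outside Pre_
      | some (q, t) =>
          logremLoopA fuel q base (factor * base) (count + 1) (remainder + t * factor)

def logrem (number : Int) (base : Int) : Int × Int :=
  logremLoopA 64 number base 1 0 0

-- ===== PORT B =====
-- B's count-only loop; same fuel totality guard.
def logremCountB : Nat → Int → Int → Int → Int
  | 0, _, _, count => count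
  | fuel+1, n, base, count =>
    if n < base then count
    else match PySem.Int.floordiv? n base with
      | none => count                -- base = 0: Python raises ZeroDivisionError; outside Pre_
      | some q => logremCountB fuel q base (count + 1)

def logrem_alt (number : Int) (base : Int) : Int × Int :=
  let c := logremCountB 64 number base 0
  (c, PySem.Int.mod number (base ^ c.toNat))

-- ===== PRECONDITION & SPEC =====
-- Pre_ excludes exactly the inputs where A never returns: base = 0 with number ≥ 0 raises
-- ZeroDivisionError, and base = 1 with number ≥ 1 or base ≤ -1 with base ≤ number ≤ base²
-- loop forever; B behaves identically there (raises / diverges), so nothing is carved out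
-- of A's returning domain.
def Pre_logrem (number : Int) (base : Int) : Prop :=
  number < base ∨ 2 ≤ base ∨ (base ≤ -1 ∧ base * base < number)
instance (number : Int) (base : Int) : Decidable (Pre_logrem number base) := by
  unfold Pre_logrem; infer_instance
def pvWitness_logrem : Int × Int := (1000, 7)

def Spec_logrem (number : Int) (base : Int) (out : Int × Int) : Prop := out = logrem_alt number base
instance (number : Int) (base : Int) (out : Int × Int) : Decidable (Spec_logrem number base out) := by unfold Spec_logrem; infer_instance

-- ===== CLAIM (what is proved, stated in full; the proofs are below) =====
def Claim_equal_logrem : Prop := ∀ (number : Int) (base : Int), Dom_logrem number base → Pre_logrem number base → Spec_logrem number base (logrem number base)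

-- ===== LEMMAS AND PROOFS =====

-- shift: the count accumulator only offsets the result
theorem countB_shift (fuel : Nat) : ∀ (n base c : Int),
    logremCountB fuel n base c = c + logremCountB fuel n base 0 := by
  induction fuel with
  | zero => intro n base c; simp [logremCountB]
  | succ fuel ih =>
    intro n base c
    simp only [logremCountB]
    split_ifs with h
    · simp
    · cases hd : PySem.Int.floordiv? n base with
      | none => simp
      | some q =>
          show logremCountB fuel q base (c+1) = c + logremCountB fuel q base (0+1)
          rw [ih q base (c+1), ih q base (0+1)]; ring

theorem countB_nonneg (fuel : Nat) : ∀ (n base : Int), 0 ≤ logremCountB fuel n base 0 := by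
  induction fuel with
  | zero => intro n base; simp [logremCountB]
  | succ fuel ih =>
    intro n base
    simp only [logremCountB]
    split_ifs with h
    · exact le_refl 0
    · cases hd : PySem.Int.floordiv? n base with
      | none => exact le_refl 0
      | some q =>
          show 0 ≤ logremCountB fuel q base (0+1)
          rw [countB_shift]; have := ih q base; omega

-- key arithmetic: peeling one digit off the closed-form modulo (positive base)
theorem mod_pow_succ (n b : Int) (k : Nat) (hb : 0 < b) :
    PySem.Int.mod n (b ^ (k + 1)) =
      PySem.Int.mod n b + b * PySem.Int.mod (PySem.Int.floordiv n b) (b ^ k) := by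
  have hbk : (0:Int) < b ^ k := pow_pos hb k
  have hbk1 : (0:Int) < b ^ (k + 1) := pow_pos hb (k + 1)
  rw [PySem.Int.mod_eq_emod_of_pos hb, PySem.Int.mod_eq_emod_of_pos hbk,
      PySem.Int.mod_eq_emod_of_pos hbk1, PySem.Int.floordiv_eq_ediv_of_pos hb]
  set q := n / b with hq
  set t := n % b with ht
  set m := q % b ^ k with hm
  have hnt : b * q + t = n := Int.mul_ediv_add_emod n b
  have hqm : b ^ k * (q / b ^ k) + m = q := Int.mul_ediv_add_emod q (b ^ k)
  have ht0 : 0 ≤ t := Int.emod_nonneg n (by omega)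
  have htb : t < b := Int.emod_lt_of_pos n hb
  have hm0 : 0 ≤ m := Int.emod_nonneg q (by positivity)
  have hmb : m < b ^ k := Int.emod_lt_of_pos q hbk
  have hlt : t + b * m < b ^ (k + 1) := by
    have h1 : b * m ≤ b * (b ^ k - 1) :=
      mul_le_mul_of_nonneg_left (by omega) (le_of_lt hb)
    have hpow : b ^ (k + 1) = b ^ k * b := pow_succ b k
    nlinarith
  have hdvd : (b ^ (k + 1) : Int) ∣ (t + b * m) - n := by
    refine ⟨-(q / b ^ k), ?_⟩
    linear_combination hnt + b * hqm
  have hmodeq : n % b ^ (k + 1) = (t + b * m) % b ^ (k + 1) :=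
    Int.modEq_iff_dvd.mpr hdvd
  have hnn : 0 ≤ t + b * m := add_nonneg ht0 (mul_nonneg (le_of_lt hb) hm0)
  rw [hmodeq, Int.emod_eq_of_lt hnn hlt]

-- main loop correspondence for base ≥ 2
theorem loop_eq (base : Int) (hb : 2 ≤ base) (fuel : Nat) :
    ∀ (n f c r : Int), 0 ≤ n → n < base ^ fuel →
    logremLoopA fuel n base f c r =
      (logremCountB fuel n base c,
       r + f * PySem.Int.mod n (base ^ (logremCountB fuel n base 0).toNat)) := by
  have hb0 : (0:Int) < base := by omega
  induction fuel with
  | zero =>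
    intro n f c r hn0 hlt
    simp only [pow_zero] at hlt
    simp [logremLoopA, logremCountB]
  | succ fuel ih =>
    intro n f c r hn0 hlt
    simp only [logremLoopA, logremCountB]
    split_ifs with h
    · simp
    · have hbne : base ≠ 0 := by omega
      simp only [PySem.Int.divmod?, PySem.Int.floordiv?, if_neg hbne]
      have hq : n.fdiv base = PySem.Int.floordiv n base := rfl
      have ht : n.fmod base = PySem.Int.mod n base := rfl
      rw [hq, ht]
      set q := PySem.Int.floordiv n base with hqdef
      have hq0 : 0 ≤ q := by
        rw [hqdef, PySem.Int.floordiv_eq_ediv_of_pos hb0]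
        exact Int.ediv_nonneg hn0 (le_of_lt hb0)
      have hqlt : q < base ^ fuel := by
        have hmul : q * base ≤ n := by
          rw [hqdef]
          linarith [PySem.Int.floordiv_mul_add_mod n base, PySem.Int.mod_nonneg n hb0]
        have hlt2 : q * base < base ^ fuel * base := by
          calc q * base ≤ n := hmul
            _ < base ^ (fuel + 1) := hlt
            _ = base ^ fuel * base := pow_succ base fuel
        exact lt_of_mul_lt_mul_right hlt2 (le_of_lt hb0)
      rw [ih q (f * base) (c + 1) (r + PySem.Int.mod n base * f) hq0 hqlt]
      have hshift : logremCountB fuel q base 1 = 1 + logremCountB fuel q base 0 :=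
        countB_shift fuel q base 1
      have hk0 : 0 ≤ logremCountB fuel q base 0 := countB_nonneg fuel q base
      rw [Prod.mk.injEq]
      refine ⟨rfl, ?_⟩
      have h01 : logremCountB fuel q base (0 + 1) = logremCountB fuel q base 1 := by norm_num
      rw [h01, hshift]
      have htn : (1 + logremCountB fuel q base 0).toNat
          = (logremCountB fuel q base 0).toNat + 1 := by omega
      rw [htn, mod_pow_succ n base _ hb0, ← hqdef]
      ring

-- one-iteration fact for negative base with number > base²
theorem neg_base_q_lt (n base : Int) (hb : base ≤ -1) (hn : base * base < n) :
    PySem.Int.floordiv n base < base := by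
  by_contra hge
  rw [not_lt] at hge
  have hmb := (PySem.Int.mod_neg_bounds n (b := base) (by omega)).2
  have heq := PySem.Int.floordiv_mul_add_mod n base
  have : PySem.Int.floordiv n base * base ≤ base * base := by
    nlinarith
  omega

theorem boundDom (number base : Int) (hd : Dom_logrem number base) (hb : 2 ≤ base) :
    number < base ^ 64 := by
  have hnum : number ≤ 2147483648 := by
    unfold Dom_logrem pvDomInt at hd
    simp only [Bool.and_eq_true, decide_eq_true_eq] at hd
    exact hd.1.2
  have h2 : (2:Int) ^ 64 ≤ base ^ 64 := pow_le_pow_left₀ (by norm_num) hb 64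
  have : (2147483648:Int) < 2 ^ 64 := by norm_num
  omega

-- ===== VERDICT (by name: the statement is the Claim_ definition above) =====
theorem logrem_spec : Claim_equal_logrem := by
  intro number base hdom hpre
  unfold Spec_logrem logrem logrem_alt
  by_cases hlt : number < base
  · -- loop never runs: both return (0, ·) and number % base^0 = number % 1 = 0
    simp [logremLoopA, logremCountB, hlt]
  · rcases hpre with h | hb | ⟨hb, hn⟩
    · exact absurd h hlt
    · -- base ≥ 2: the loop correspondence
      have hn0 : 0 ≤ number := by omega
      rw [loop_eq base hb 64 number 1 0 0 hn0 (boundDom number base hdom hb)]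
      simp
    · -- base ≤ -1 and number > base²: exactly one iteration on both sides
      have hbne : base ≠ 0 := by omega
      have hq : PySem.Int.floordiv number base < base := neg_base_q_lt number base hb hn
      simp only [logremLoopA, logremCountB, if_neg hlt,
        PySem.Int.divmod?, PySem.Int.floordiv?, if_neg hbne]
      have hqd : number.fdiv base = PySem.Int.floordiv number base := rfl
      have htd : number.fmod base = PySem.Int.mod number base := rfl
      rw [hqd, htd]
      simp [hq]
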